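-- pv_equiv track=rewrite | github.com/dayaelee/baekjoon | 9020.py | result
-- ===== SOURCE A (Python) =====
-- def result(ele, n):
--     left=0
--     right=len(ele)-1
--     total=[]
--     while 1:
--         if ele[left]+ele[right]==n:
--             total.append([ele[left], ele[right]])
--             right = len(ele)-1
--             left+=1
--             if left==len(ele):
--                 break
--         else:
--             right-=1
--             if right==-1:
--                 left+=1
--                 right=len(ele)-1
--                 if left==len(ele):
--                     break
--
--     minN = float("inf")
--     rA=0
--     rB=0
--     for i in total:
--         a, b = i
--         if minN>abs(a-b):
--             rA=a
--             rB=b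
--             minN=abs(a-b)
--     tmp = [rA, rB]
--     return sorted(tmp)
-- ===== SOURCE B (Python) =====
-- def result(ele, n):
--     s = set(ele)
--     best = None  # (abs diff, a) of best pair seen so far, first-wins on ties
--     for a in ele:
--         if n - a in s:
--             d = abs(2 * a - n)
--             if best is None or d < best[0]:
--                 best = (d, a)
--     if best is None:
--         return [0, 0]
--     a = best[1]
--     return sorted([a, n - a])
-- ===== Notes on version B (the rewrite author's own statement) =====
-- stated objective: faster
-- what changed: A scans, for each left element, the whole list right-to-left for a partner (quadratic); B makes one pass with a precomputed set, using that the partner of a can only be the value n-a, keeping the first pair of minimal |2a-n|.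
import Mathlib
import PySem

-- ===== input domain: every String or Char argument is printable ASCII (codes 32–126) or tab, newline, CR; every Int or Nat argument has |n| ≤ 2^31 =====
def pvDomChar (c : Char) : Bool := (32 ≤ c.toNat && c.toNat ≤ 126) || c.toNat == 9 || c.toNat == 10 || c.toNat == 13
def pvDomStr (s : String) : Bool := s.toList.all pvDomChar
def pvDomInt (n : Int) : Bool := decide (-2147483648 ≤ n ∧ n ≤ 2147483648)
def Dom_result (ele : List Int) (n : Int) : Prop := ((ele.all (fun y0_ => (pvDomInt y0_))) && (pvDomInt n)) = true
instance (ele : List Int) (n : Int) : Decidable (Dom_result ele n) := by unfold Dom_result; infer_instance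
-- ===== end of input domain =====

-- B replaces A's quadratic double-pointer scan by a single pass over `ele` with a set
-- membership test (the matching partner of `a` can only be the value `n - a`), keeping the
-- first pair of minimal |a - b| exactly as A does. Equivalence is about the return value.

-- ===== PORT A =====
-- inner scan: right pointer moving down from index `r-1` to 0, looking for ele[left]+ele[right]==n
def innerA (ele : List Int) (n a : Int) : Nat → Option Int
  | 0 => none
  | r + 1 =>
    match PySem.List.pyGet? ele ((r : Nat) : Int) with
    | none => none
    | some b => if a + b = n then some b else innerA ele n a r

-- outer loop: left pointer walks the list; on each left a full fresh right scan (as A resets right)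
def outerA (ele : List Int) (n : Int) : List Int → List (Int × Int) → List (Int × Int)
  | [], total => total
  | a :: rest, total =>
    match innerA ele n a ele.length with
    | some b => outerA ele n rest (total ++ [(a, b)])
    | none => outerA ele n rest total

def result (ele : List Int) (n : Int) : List Int :=
  let total := outerA ele n ele []
  let st := total.foldl (fun (st : Option Int × Int × Int) p =>
      match st.1 with
      | none => (some |p.1 - p.2|, p.1, p.2)            -- minN = inf: always improves
      | some m => if |p.1 - p.2| < m then (some |p.1 - p.2|, p.1, p.2) else st)
    (none, 0, 0)
  PySem.List.sorted [st.2.1, st.2.2] (fun x => x) false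

-- ===== PORT B =====
def result_alt (ele : List Int) (n : Int) : List Int :=
  let s := PySem.Set.ofList ele
  let best := ele.foldl (fun (best : Option (Int × Int)) a =>
      if PySem.Set.contains s (n - a) then
        let d := |2 * a - n|
        match best with
        | none => some (d, a)
        | some b => if d < b.1 then some (d, a) else best
      else best) none
  match best with
  | none => [0, 0]
  | some b => PySem.List.sorted [b.2, n - b.2] (fun x => x) false

-- ===== PRECONDITION & SPEC =====
-- Pre_ excludes only the empty list, on which A raises IndexError at ele[left]
-- (B's algorithm returns [0, 0] there; equivalence is claimed only on nonempty lists).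
def Pre_result (ele : List Int) (_n : Int) : Prop := ele ≠ []
instance (ele : List Int) (n : Int) : Decidable (Pre_result ele n) := by unfold Pre_result; infer_instance
def pvWitness_result : List Int × Int := ([2, 3], 5)

def Spec_result (ele : List Int) (n : Int) (out : List Int) : Prop := out = result_alt ele n
instance (ele : List Int) (n : Int) (out : List Int) : Decidable (Spec_result ele n out) := by unfold Spec_result; infer_instance

-- ===== CLAIM (what is proved, stated in full; the proofs are below) =====
def Claim_equal_result : Prop := ∀ (ele : List Int) (n : Int), Dom_result ele n → Pre_result ele n → Spec_result ele n (result ele n)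

-- ===== LEMMAS AND PROOFS =====

-- A's inner scan finds the partner value n - a iff it occurs among the first r elements.
theorem innerA_spec (ele : List Int) (n a : Int) :
    ∀ r, r ≤ ele.length →
      innerA ele n a r = if (n - a) ∈ ele.take r then some (n - a) else none := by
  intro r
  induction r with
  | zero => intro _; simp [innerA]
  | succ r ih =>
    intro hr
    have hrlt : r < ele.length := by omega
    rw [innerA, PySem.List.pyGet?_natCast, List.getElem?_eq_getElem hrlt]
    have htake : ele.take (r + 1) = ele.take r ++ [ele[r]] := List.take_succ_eq_append_getElem hrlt
    by_cases h : a + ele[r] = n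
    · have : ele[r] = n - a := by omega
      simp [htake, this]
    · have hne : ele[r] ≠ n - a := by omega
      rw [ih (by omega)]
      simp only [htake, List.mem_append, List.mem_singleton]
      by_cases hm : (n - a) ∈ ele.take r
      · simp [h, hm]
      · simp only [htake] at *
        simp [h, hm]
        omega
      
theorem innerA_full (ele : List Int) (n a : Int) :
    innerA ele n a ele.length = if (n - a) ∈ ele then some (n - a) else none := by
  rw [innerA_spec ele n a ele.length (le_refl _), List.take_length]

-- A's first phase builds exactly the pairs (a, n - a) for the a's whose partner occurs in ele.
theorem outerA_spec (ele : List Int) (n : Int) :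
    ∀ (lst : List Int) (total : List (Int × Int)),
      outerA ele n lst total =
        total ++ lst.filterMap (fun a => if (n - a) ∈ ele then some (a, n - a) else none) := by
  intro lst
  induction lst with
  | nil => intro total; simp [outerA]
  | cons a rest ih =>
    intro total
    rw [outerA, innerA_full]
    by_cases h : (n - a) ∈ ele
    · simp only [h, if_pos, List.filterMap_cons]
      rw [ih]
      simp
    · simp only [h, if_neg, not_false_iff]
      rw [ih]
      simp [h]

-- correspondence between A's min-fold state and B's best option
def RelSt (n : Int) (st : Option Int × Int × Int) (best : Option (Int × Int)) : Prop :=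
  (st = (none, 0, 0) ∧ best = none) ∨
  (∃ d a, best = some (d, a) ∧ st = (some d, a, n - a) ∧ d = |2 * a - n|)

theorem fold_rel (ele : List Int) (n : Int) :
    ∀ (lst : List Int) (st : Option Int × Int × Int) (best : Option (Int × Int)),
      RelSt n st best →
      RelSt n
        ((lst.filterMap (fun a => if (n - a) ∈ ele then some (a, n - a) else none)).foldl
          (fun (st : Option Int × Int × Int) p =>
            match st.1 with
            | none => (some |p.1 - p.2|, p.1, p.2)
            | some m => if |p.1 - p.2| < m then (some |p.1 - p.2|, p.1, p.2) else st) st)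
        (lst.foldl (fun (best : Option (Int × Int)) a =>
            if PySem.Set.contains (PySem.Set.ofList ele) (n - a) then
              let d := |2 * a - n|
              match best with
              | none => some (d, a)
              | some b => if d < b.1 then some (d, a) else best
            else best) best) := by
  intro lst
  induction lst with
  | nil => intro st best h; simpa using h
  | cons a rest ih =>
    intro st best h
    simp only [List.filterMap_cons, List.foldl_cons]
    have hcont : PySem.Set.contains (PySem.Set.ofList ele) (n - a) = decide ((n - a) ∈ ele) := by
      simp [PySem.Set.contains, PySem.Set.mem_ofList]
    by_cases hm : (n - a) ∈ ele
    · simp only [hm, if_pos, hcont, decide_true, List.foldl_cons]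
      apply ih
      have habs : |a - (n - a)| = |2 * a - n| := by ring_nf
      rcases h with ⟨hst, hbest⟩ | ⟨d, x, hbest, hst, hd⟩
      · subst hst; subst hbest
        right; exact ⟨|2 * a - n|, a, rfl, by simp [habs], rfl⟩
      · subst hbest; subst hst; subst hd
        by_cases hlt : |2 * a - n| < |2 * x - n|
        · right
          refine ⟨|2 * a - n|, a, ?_, ?_, rfl⟩ <;> simp [hlt, habs]
        · right
          refine ⟨|2 * x - n|, x, ?_, ?_, rfl⟩ <;> simp [hlt, habs]
    · simp only [hm, if_neg, not_false_iff, hcont, decide_false]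
      exact ih st best h
  
-- ===== VERDICT (by name: the statement is the Claim_ definition above) =====
theorem result_spec : Claim_equal_result := by
  intro ele n _ _
  unfold Spec_result result result_alt
  rw [outerA_spec]
  simp only [List.nil_append]
  have h := fold_rel ele n ele (none, 0, 0) none (Or.inl ⟨rfl, rfl⟩)
  rcases h with ⟨hst, hbest⟩ | ⟨d, a, hbest, hst, hd⟩
  · rw [hst, hbest]
    rfl
  · rw [hst, hbest]
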